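-- pv_equiv track=rewrite | github.com/davidvzCode/practice-python | devsu.py | find_sum_pair
-- ===== SOURCE A (Python) =====
-- def find_sum_pair(numbers, k):
--     cont = -1
--     res = []
--     for i in numbers:
--         cont += 1
--         for j in range(cont, len(numbers)):
--             sum = i + numbers[j]
--             if sum == k:
--                 res.append([cont, j])
--     if len(res) == 0:
--         return [0 , 0]
--     res.sort()
--     return res[0]
-- ===== SOURCE B (Python) =====
-- def find_sum_pair(numbers, k):
--     # O(n): map each value to its LAST index, then take the first i whose
--     # complement occurs at some index >= i, and scan forward once for the
--     # smallest such j.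
--     last = {}
--     for idx, v in enumerate(numbers):
--         last[v] = idx
--     for i, v in enumerate(numbers):
--         c = k - v
--         if last.get(c, -1) >= i:
--             j = i
--             while numbers[j] != c:
--                 j += 1
--             return [i, j]
--     return [0, 0]
-- ===== Notes on version B (the rewrite author's own statement) =====
-- stated objective: faster
-- what changed: A enumerates every pair (i,j) with j>=i, collects all matches, sorts them and returns the first; B builds a value-to-last-index dictionary in one pass, takes the first i whose complement k-numbers[i] occurs at an index >= i, and finds the smallest such j with a single forward scan.
import Mathlib
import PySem

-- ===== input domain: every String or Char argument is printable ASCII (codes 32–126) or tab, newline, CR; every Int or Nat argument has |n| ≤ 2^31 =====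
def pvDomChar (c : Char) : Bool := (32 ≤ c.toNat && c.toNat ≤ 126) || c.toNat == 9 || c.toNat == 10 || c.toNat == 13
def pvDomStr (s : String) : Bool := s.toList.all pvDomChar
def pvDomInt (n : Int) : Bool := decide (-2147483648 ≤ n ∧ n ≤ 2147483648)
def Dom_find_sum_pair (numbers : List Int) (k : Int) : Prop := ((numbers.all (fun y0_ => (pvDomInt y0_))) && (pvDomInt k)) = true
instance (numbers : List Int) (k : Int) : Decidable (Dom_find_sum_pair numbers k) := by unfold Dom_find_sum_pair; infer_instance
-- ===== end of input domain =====

-- B replaces A's collect-all-pairs / sort / take-minimum with a single-pass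
-- last-index dictionary plus one forward scan (objective: faster).

-- ===== PORT A =====
-- literal port of A: nested loops collecting every pair, then sort and take res[0]
def find_sum_pair (numbers : List Int) (k : Int) : List Int :=
  let st := numbers.foldl
    (fun (st : Int × List (List Int)) i =>
      let cont := st.1 + 1
      let res := (PySem.List.pyRange cont (numbers.length : Int) 1).foldl
        (fun res j =>
          -- numbers[j]: j drawn from range(cont, len(numbers)) is always in range
          if (i + PySem.List.pyGetD numbers j 0) == k then res ++ [[cont, j]] else res)
        st.2
      (cont, res))
    ((-1 : Int), ([] : List (List Int)))
  let res := st.2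
  if res.length == 0 then [0, 0]
  else (PySem.List.pyGet? (PySem.List.sorted res (fun x => x) false) 0).getD []  -- res[0], guarded nonempty

-- ===== PORT B =====
-- 'j = i; while numbers[j] != c: j += 1' — walking the suffix numbers.drop i is exact
-- since j only ever moves right from i ≥ 0 one step at a time
def bFind : List Int → Int → Int → Int
  | [], _, j => j            -- unreachable under B's guard (the complement exists in the suffix)
  | x :: t, c, j => if x == c then j else bFind t c (j + 1)

-- 'for i, v in enumerate(numbers): …' with early return
def bLoop (numbers : List Int) (k : Int) (last : PySem.Dict Int Int) : List (Int × Int) → List Int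
  | [] => [0, 0]
  | (i, v) :: rest =>
      let c := k - v
      if last.getD c (-1) ≥ i then [i, bFind (numbers.drop i.toNat) c i]
      else bLoop numbers k last rest

def find_sum_pair_alt (numbers : List Int) (k : Int) : List Int :=
  let last := (PySem.List.enumerate numbers 0).foldl (fun d p => d.insert p.2 p.1) PySem.Dict.empty
  bLoop numbers k last (PySem.List.enumerate numbers 0)

-- ===== PRECONDITION & SPEC =====
def Spec_find_sum_pair (numbers : List Int) (k : Int) (out : List Int) : Prop := out = find_sum_pair_alt numbers k
instance (numbers : List Int) (k : Int) (out : List Int) : Decidable (Spec_find_sum_pair numbers k out) := by unfold Spec_find_sum_pair; infer_instance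

-- ===== CLAIM (what is proved, stated in full; the proofs are below) =====
def Claim_equal_find_sum_pair : Prop := ∀ (numbers : List Int) (k : Int), Dom_find_sum_pair numbers k → Spec_find_sum_pair numbers k (find_sum_pair numbers k)

-- ===== LEMMAS AND PROOFS =====

-- the pairs A's inner loop contributes for one outer iteration (cont, value) = p
def pvF (numbers : List Int) (k : Int) (p : Int × Int) : List (List Int) :=
  ((PySem.List.pyRange p.1 (numbers.length : Int) 1).filter
      (fun j => (p.2 + PySem.List.pyGetD numbers j 0) == k)).map (fun j => [p.1, j])

-- A's outer fold, characterised
theorem pvA_outer (numbers : List Int) (k : Int) :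
    ∀ (l : List Int) (c0 : Int) (acc : List (List Int)),
    l.foldl
      (fun (st : Int × List (List Int)) i =>
        let cont := st.1 + 1
        let res := (PySem.List.pyRange cont (numbers.length : Int) 1).foldl
          (fun res j =>
            if (i + PySem.List.pyGetD numbers j 0) == k then res ++ [[cont, j]] else res)
          st.2
        (cont, res)) (c0, acc)
    = (c0 + l.length, acc ++ (PySem.List.enumerate l (c0 + 1)).flatMap (pvF numbers k)) := by
  intro l
  induction l with
  | nil => intro c0 acc; simp [PySem.List.enumerate]
  | cons x xs ih =>
      intro c0 acc
      simp only [List.foldl_cons, ih, PySem.List.enumerate_cons, List.flatMap_cons]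
      rw [PySem.List.foldl_append_if (fun j => (x + PySem.List.pyGetD numbers j 0) == k)
            (fun j => [c0 + 1, j])]
      simp only [List.length_cons, Prod.mk.injEq]
      refine ⟨by push_cast; ring, by simp [pvF, List.append_assoc]⟩
      
-- the dictionary fold computes: last match in the list, else the old value
theorem pvLastFold (l : List (Int × Int)) (d : PySem.Dict Int Int) (c : Int) :
    ((l.foldl (fun d (p : Int × Int) => d.insert p.2 p.1) d).getD c (-1)) =
    (match l.reverse.find? (fun p => p.2 == c) with
     | some p => p.1
     | none => d.getD c (-1)) := by
  induction l generalizing d with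
  | nil => simp
  | cons p t ih =>
      simp only [List.foldl_cons, ih, List.reverse_cons, List.find?_append]
      cases h : List.find? (fun p => p.2 == c) t.reverse with
      | some q => simp
      | none =>
          simp only [Option.none_or]
          by_cases hc : p.2 = c
          · subst hc; simp
          · simp [PySem.Dict.getD_insert, hc, Ne.symm hc]

-- B's while-loop scan, characterised by findIdx?
theorem pvBFind (c : Int) :
    ∀ (t : List Int) (j : Int),
    bFind t c j = (match t.findIdx? (fun x => x == c) with
                   | some m => j + (m : Int)
                   | none => j + t.length) := by
  intro t
  induction t with
  | nil => intro j; simp [bFind]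
  | cons x xs ih =>
      intro j
      simp only [bFind, List.findIdx?_cons]
      by_cases hx : x = c
      · simp [hx]
      · simp only [beq_iff_eq, hx, if_false, ih]
        cases h : List.findIdx? (fun x => x == c) xs with
        | some m => simp; ring
        | none => simp; ring

-- first index ≥ c matching a predicate on values: range-filter head vs findIdx? on the suffix
theorem pvFilterRange (numbers : List Int) (q : Int → Bool) :
    ∀ (t : List Int) (c : Int), 0 ≤ c → numbers.drop c.toNat = t →
    ((PySem.List.pyRange c (numbers.length : Int) 1).filter
        (fun j => q (PySem.List.pyGetD numbers j 0))).head?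
      = (t.findIdx? q).map (fun m => c + (m : Int)) := by
  intro t
  induction t with
  | nil =>
      intro c hc hd
      have : (numbers.length : Int) ≤ c := by
        have := List.drop_eq_nil_iff.mp hd
        omega
      simp [PySem.List.pyRange_one_eq_nil this]
  | cons x xs ih =>
      intro c hc hd
      have hlt : c.toNat < numbers.length := by
        by_contra hge
        rw [List.drop_eq_nil_of_le (by omega)] at hd
        exact (List.cons_ne_nil x xs) hd.symm
      have hclt : c < (numbers.length : Int) := by omega
      have hx : numbers[c.toNat] = x := by
        have h0 : (numbers.drop c.toNat)[0]? = some x := by rw [hd]; rfl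
        rw [List.getElem?_drop, Nat.add_zero, List.getElem?_eq_getElem hlt] at h0
        exact Option.some.inj h0
      have hget : PySem.List.pyGetD numbers c 0 = x := by
        rw [PySem.List.pyGetD_eq_getElem numbers 0 hc (by exact_mod_cast hclt)]; exact hx
      have hdrop : numbers.drop (c + 1).toNat = xs := by
        have h1 : (c + 1).toNat = c.toNat + 1 := by omega
        rw [h1, ← List.drop_drop, hd]; simp
      rw [PySem.List.pyRange_one_cons hclt]
      simp only [List.filter_cons, hget, List.findIdx?_cons]
      by_cases hq : q x = true
      · simp [hq]
      · simp only [hq, if_false, Bool.false_eq_true]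
        rw [ih (c + 1) (by omega) hdrop]
        cases h : List.findIdx? q xs with
        | some m => simp; ring
        | none => simp

-- membership in the suffix, spelled with absolute indices
theorem pvMemDrop (numbers : List Int) (i : Int) (hi : 0 ≤ i) (x : Int) :
    x ∈ numbers.drop i.toNat ↔ ∃ (m : Nat) (h : m < numbers.length), i ≤ (m : Int) ∧ numbers[m] = x := by
  rw [List.mem_iff_getElem?]
  constructor
  · rintro ⟨j, hj⟩
    rw [List.getElem?_drop] at hj
    rw [List.getElem?_eq_some_iff] at hj
    obtain ⟨hlt, heq⟩ := hj
    exact ⟨i.toNat + j, hlt, by omega, heq⟩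
  · rintro ⟨m, hm, him, hx⟩
    refine ⟨m - i.toNat, ?_⟩
    rw [List.getElem?_drop]
    have h2 : i.toNat + (m - i.toNat) = m := by omega
    rw [h2, List.getElem?_eq_getElem hm, hx]

-- the built dictionary: its entry for c is an actual index of c …
theorem pvBuilt_mem (numbers : List Int) (c m : Int)
    (h : ((PySem.List.enumerate numbers 0).foldl
            (fun d (p : Int × Int) => d.insert p.2 p.1) PySem.Dict.empty).getD c (-1) = m)
    (hm : 0 ≤ m) :
    ∃ (mn : Nat) (hlt : mn < numbers.length), m = (mn : Int) ∧ numbers[mn] = c := by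
  rw [pvLastFold] at h
  cases hf : List.find? (fun p => p.2 == c) (PySem.List.enumerate numbers 0).reverse with
  | none => rw [hf] at h; simp at h; omega
  | some p =>
      rw [hf] at h
      simp at h
      have hpc : p.2 = c := by simpa using List.find?_some hf
      have hpm : p ∈ PySem.List.enumerate numbers 0 :=
        List.mem_reverse.mp (List.mem_of_find?_eq_some hf)
      rw [PySem.List.mem_enumerate_iff] at hpm
      obtain ⟨kk, hk, hp⟩ := hpm
      exact ⟨kk, hk, by rw [← h, hp]; simp, by rw [← hpc, hp]⟩

-- … and it dominates every index of c
theorem pvBuilt_ge (numbers : List Int) (c : Int) (jn : Nat) (hj : jn < numbers.length)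
    (hx : numbers[jn] = c) :
    (jn : Int) ≤ ((PySem.List.enumerate numbers 0).foldl
        (fun d (p : Int × Int) => d.insert p.2 p.1) PySem.Dict.empty).getD c (-1) := by
  rw [pvLastFold]
  have hmem : ((jn : Int), c) ∈ (PySem.List.enumerate numbers 0).reverse := by
    rw [List.mem_reverse, PySem.List.mem_enumerate_iff]
    exact ⟨jn, hj, by simp [hx]⟩
  cases hf : List.find? (fun p => p.2 == c) (PySem.List.enumerate numbers 0).reverse with
  | none =>
      have := List.find?_eq_none.mp hf _ hmem
      simp at this
  | some q =>
      simp only []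
      rw [List.find?_eq_some_iff_append] at hf
      obtain ⟨hq, as, bs, hsplit, hfail⟩ := hf
      rcases (by rw [hsplit] at hmem; simpa using hmem :
          ((jn : Int), c) ∈ as ∨ ((jn : Int), c) = q ∨ ((jn : Int), c) ∈ bs) with h1 | h2 | h3
      · have := hfail _ h1; simp at this
      · rw [← h2]
      · -- reverse of enumerate has strictly decreasing indices
        have hpw : ((PySem.List.enumerate numbers 0).reverse).Pairwise
            (fun p q : Int × Int => q.1 < p.1) := by
          rw [List.pairwise_reverse]
          exact PySem.List.pairwise_lt_enumerate numbers 0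
        rw [hsplit, List.pairwise_append] at hpw
        have := (List.pairwise_cons.mp hpw.2.1).1 _ h3
        simp at this
        omega

-- A's pair list is strictly increasing in Python's (lexicographic) list order
theorem pvRes_pairwise (numbers : List Int) (k : Int) :
    ((PySem.List.enumerate numbers 0).flatMap (pvF numbers k)).Pairwise
      (fun a b : List Int => List.Lex (· < ·) a b) := by
  rw [List.flatMap_def, List.pairwise_flatten]
  refine ⟨?_, ?_⟩
  · intro l' hl'
    rw [List.mem_map] at hl'
    obtain ⟨p, _, rfl⟩ := hl'
    unfold pvF
    rw [List.pairwise_map]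
    exact ((PySem.List.pairwise_lt_pyRange_one p.1 (numbers.length : Int)).filter _).imp
      (fun h => List.Lex.cons (List.Lex.rel h))
  · rw [List.pairwise_map]
    refine (PySem.List.pairwise_lt_enumerate numbers 0).imp ?_
    intro p q hpq x hx y hy
    unfold pvF at hx hy
    rw [List.mem_map] at hx hy
    obtain ⟨jx, _, rfl⟩ := hx
    obtain ⟨jy, _, rfl⟩ := hy
    exact List.Lex.rel hpq

-- B's main loop returns the head of A's remaining pair list (default [0,0])
theorem pvLoop (numbers : List Int) (k : Int) :
    ∀ (l : List (Int × Int)), (∀ p ∈ l, p ∈ PySem.List.enumerate numbers 0) →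
    bLoop numbers k
      ((PySem.List.enumerate numbers 0).foldl
        (fun d (p : Int × Int) => d.insert p.2 p.1) PySem.Dict.empty) l
    = ((l.flatMap (pvF numbers k)).head?).getD [0, 0] := by
  intro l
  induction l with
  | nil => intro _; simp [bLoop]
  | cons p rest ih =>
      intro hmem
      obtain ⟨i, v⟩ := p
      have hp := hmem _ (List.mem_cons_self)
      rw [PySem.List.mem_enumerate_iff] at hp
      obtain ⟨kk, hk, hpeq⟩ := hp
      have hi : i = (kk : Int) := by simpa using congrArg Prod.fst hpeq
      have hv : v = numbers[kk] := by simpa using congrArg Prod.snd hpeq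
      have hi0 : 0 ≤ i := by omega
      -- the two predicates agree: v + x == k  ↔  x == k - v
      have hqq : (fun x : Int => (v + x) == k) = (fun x : Int => x == (k - v)) := by
        funext x; rw [Bool.eq_iff_iff]; simp [beq_iff_eq]; omega
      have hhead := pvFilterRange numbers (fun x : Int => (v + x) == k)
        (numbers.drop i.toNat) i hi0 rfl
      beta_reduce at hhead
      rw [List.flatMap_cons, bLoop]
      by_cases hcond : ((PySem.List.enumerate numbers 0).foldl
          (fun d (p : Int × Int) => d.insert p.2 p.1) PySem.Dict.empty).getD (k - v) (-1) ≥ i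
      · -- complement exists at an index ≥ i
        obtain ⟨mn, hmn, hmeq, hmc⟩ := pvBuilt_mem numbers (k - v) _ rfl (by omega)
        have hex : ∃ x ∈ numbers.drop i.toNat, (fun x : Int => (v + x) == k) x = true := by
          refine ⟨numbers[mn], ?_, by simp [hmc]⟩
          rw [pvMemDrop numbers i hi0]
          exact ⟨mn, hmn, by omega, rfl⟩
        cases hfi : (numbers.drop i.toNat).findIdx? (fun x : Int => (v + x) == k) with
        | none =>
            rw [List.findIdx?_eq_none_iff] at hfi
            obtain ⟨x, hx1, hx2⟩ := hex
            have hx2' : ((v + x) == k) = true := hx2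
            rw [hfi x hx1] at hx2'
            exact absurd hx2' (by simp)
        | some m =>
            rw [hfi] at hhead
            have hne : pvF numbers k (i, v) ≠ [] := by
              unfold pvF
              intro hnil
              rw [← List.head?_eq_none_iff] at hnil
              rw [List.head?_map, hhead] at hnil
              simp at hnil
            have hhd : (pvF numbers k (i, v)).head? = some [i, i + (m : Int)] := by
              unfold pvF
              rw [List.head?_map, hhead]
              rfl
            have hbf : bFind (numbers.drop i.toNat) (k - v) i = i + (m : Int) := by
              rw [pvBFind, ← hqq, hfi]
            simp only [if_pos hcond]
            cases hpv : pvF numbers k (i, v) with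
            | nil => exact absurd hpv hne
            | cons r t =>
                have : r = [i, i + (m : Int)] := by
                  rw [hpv] at hhd; simpa using hhd
                rw [List.cons_append, List.head?_cons, Option.getD_some, this, hbf]
      · -- no complement at any index ≥ i: this cont contributes nothing
        have hnone : (numbers.drop i.toNat).findIdx? (fun x : Int => (v + x) == k) = none := by
          rw [List.findIdx?_eq_none_iff]
          intro x hx
          rw [pvMemDrop numbers i hi0] at hx
          obtain ⟨mn, hmn, him, hxv⟩ := hx
          by_contra hq
          have hq' : v + x = k := by simpa using hq
          have := pvBuilt_ge numbers (k - v) mn hmn (by omega)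
          omega
        have hempty : pvF numbers k (i, v) = [] := by
          rw [← List.head?_eq_none_iff]
          unfold pvF
          rw [List.head?_map, hhead, hnone]
          rfl
        rw [if_neg hcond, hempty, List.nil_append]
        exact ih (fun q hq => hmem _ (List.mem_cons_of_mem _ hq))

-- ===== VERDICT (by name: the statement is the Claim_ definition above) =====
theorem find_sum_pair_spec : Claim_equal_find_sum_pair := by
  intro numbers k _dom
  unfold Spec_find_sum_pair find_sum_pair find_sum_pair_alt
  rw [pvA_outer numbers k numbers (-1) []]
  have h01 : (-1 : Int) + 1 = 0 := by norm_num
  rw [h01, List.nil_append, pvLoop numbers k (PySem.List.enumerate numbers 0) (fun p hp => hp)]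
  dsimp only
  cases hr : List.flatMap (pvF numbers k) (PySem.List.enumerate numbers 0) with
  | nil => simp
  | cons r t =>
      simp only [List.length_cons, List.head?_cons, Option.getD_some]
      rw [if_neg (by simp : ¬ (((t.length + 1 : Nat) == 0) = true))]
      have hsorted : PySem.List.sorted (r :: t) (fun x => x) false = r :: t := by
        have hpin : (PySem.List.sorted (r :: t) (fun x => x) false : List (List Int))
            = @PySem.List.sorted (List Int) (List Int) List.instLinearOrder.toLT
                LinearOrder.toDecidableLT (r :: t) (fun x => x) false := by
          congr 1
        rw [hpin]
        refine PySem.List.sorted_eq_of_perm_of_pairwise_lt _ _ _ (List.Perm.refl _) ?_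
        have hpw := pvRes_pairwise numbers k
        rw [hr] at hpw
        exact hpw
      rw [hsorted, PySem.List.pyGet?_zero_cons]
      rfl
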